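-- pv_equiv track=rewrite | github.com/HLPJay/ai_project | 04_music-to-mv/music-to-mv-v2/src/scene_analyzer.py | _pick_visual_focus
-- ===== SOURCE A (Python) =====
-- FOCUS_KEYWORDS = {
--     "character": (
--         "i ", "you ", "we ", "he ", "she ", "they ", "face", "eyes",
--         "hand", "smile", "kiss", "walk", "run", "dance", "embrace",
--     ),
--     "environment": (
--         "sky", "sea", "river", "rain", "wind", "street", "station",
--         "city", "room", "window", "night", "sunset", "mountain", "road",
--     ),
--     "object": (
--         "letter", "chair", "bench", "lamp", "phone", "cup", "coffee",
--         "train", "bicycle", "guitar", "door", "mirror", "flower",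
--     ),
--     "symbolic": (
--         "memory", "dream", "shadow", "echo", "silence", "absence",
--         "goodbye", "waiting", "time", "summer", "winter", "lonely",
--     ),
-- }
--
-- def _pick_visual_focus(text: str) -> str:
--     lower = f" {text.lower()} "
--     scores = {}
--     for focus, keywords in FOCUS_KEYWORDS.items():
--         scores[focus] = sum(1 for kw in keywords if kw in lower)
--
--     best_focus = max(scores, key=scores.get)
--     if scores[best_focus] <= 0:
--         return "mixed"
--     return best_focus
-- ===== SOURCE B (Python) =====
-- FOCUS_KEYWORDS = {
--     "character": (
--         "i ", "you ", "we ", "he ", "she ", "they ", "face", "eyes",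
--         "hand", "smile", "kiss", "walk", "run", "dance", "embrace",
--     ),
--     "environment": (
--         "sky", "sea", "river", "rain", "wind", "street", "station",
--         "city", "room", "window", "night", "sunset", "mountain", "road",
--     ),
--     "object": (
--         "letter", "chair", "bench", "lamp", "phone", "cup", "coffee",
--         "train", "bicycle", "guitar", "door", "mirror", "flower",
--     ),
--     "symbolic": (
--         "memory", "dream", "shadow", "echo", "silence", "absence",
--         "goodbye", "waiting", "time", "summer", "winter", "lonely",
--     ),
-- }
--
-- _MAX_KW_LEN = max(len(kw) for kws in FOCUS_KEYWORDS.values() for kw in kws)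
--
--
-- def _pick_visual_focus(text: str) -> str:
--     lower = f" {text.lower()} "
--     # Index the text ONCE: the set of all its substrings of length 1.._MAX_KW_LEN.
--     # A keyword occurs in the text iff it is one of these grams, so no keyword
--     # ever rescans the text.
--     grams = set()
--     for i in range(len(lower)):
--         for l in range(1, _MAX_KW_LEN + 1):
--             grams.add(lower[i:i + l])
--     best_focus, best_score = "mixed", 0
--     for focus, keywords in FOCUS_KEYWORDS.items():
--         score = sum(kw in grams for kw in keywords)
--         if score > best_score:
--             best_focus, best_score = focus, score
--     return best_focus
-- ===== Notes on version B (the rewrite author's own statement) =====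
-- stated objective: alternative
-- what changed: Instead of scanning the text once per keyword with 'kw in lower' and a scores dict + max(dict, key=get), B indexes the text in a single pass into a set of all its substrings (grams) of length up to the longest keyword, so each keyword match is one set lookup, and keeps a running (best_focus, best_score) with strict '>' for max's first-key tie-breaking and the all-zero 'mixed' fallback built into the start value.
import Mathlib
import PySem

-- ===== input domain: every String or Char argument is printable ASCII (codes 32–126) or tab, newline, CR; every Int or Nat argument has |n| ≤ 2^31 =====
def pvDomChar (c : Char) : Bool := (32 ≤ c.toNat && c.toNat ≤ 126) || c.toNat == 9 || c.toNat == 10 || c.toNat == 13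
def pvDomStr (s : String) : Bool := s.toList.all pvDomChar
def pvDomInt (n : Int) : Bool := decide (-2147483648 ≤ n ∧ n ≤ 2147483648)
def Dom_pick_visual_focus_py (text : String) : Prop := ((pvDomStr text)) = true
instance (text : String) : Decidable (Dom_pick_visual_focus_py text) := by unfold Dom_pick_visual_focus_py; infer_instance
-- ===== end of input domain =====

-- B replaces A's per-keyword text scans + scores-dict + max(dict, key=get) by a one-pass substring
-- index (the set of all grams of the text up to the longest keyword length) queried once per keyword,
-- with a running best instead of the dict: a different algorithm of similar cost.

-- ===== PORT A =====
-- module constant FOCUS_KEYWORDS (dict literal, insertion order)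
def focus_keywords : List (String × List String) :=
  [("character", ["i ", "you ", "we ", "he ", "she ", "they ", "face", "eyes",
     "hand", "smile", "kiss", "walk", "run", "dance", "embrace"]),
   ("environment", ["sky", "sea", "river", "rain", "wind", "street", "station",
     "city", "room", "window", "night", "sunset", "mountain", "road"]),
   ("object", ["letter", "chair", "bench", "lamp", "phone", "cup", "coffee",
     "train", "bicycle", "guitar", "door", "mirror", "flower"]),
   ("symbolic", ["memory", "dream", "shadow", "echo", "silence", "absence",
     "goodbye", "waiting", "time", "summer", "winter", "lonely"])]

def pick_visual_focus_py (text : String) : String :=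
  -- lower = f" {text.lower()} "  (kept as List Char; PySem.Chars.lower is exact)
  let lowerL : List Char := ' ' :: PySem.Chars.lower text.toList ++ [' ']
  -- scores = {}; for focus, keywords in FOCUS_KEYWORDS.items(): scores[focus] = sum(1 for kw in keywords if kw in lower)
  let scores : PySem.Dict String Int :=
    focus_keywords.foldl (fun d p =>
      d.insert p.1 ((p.2.map (fun kw => if PySem.Chars.isIn kw.toList lowerL then (1 : Int) else 0)).sum))
      PySem.Dict.empty
  -- best_focus = max(scores, key=scores.get)  (iterates keys; first maximal key wins)
  match PySem.List.max? scores.keys (fun k => scores.getD k 0) with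
  | none => "mixed"   -- unreachable: the dict has four keys
  | some best_focus => if scores.getD best_focus 0 ≤ 0 then "mixed" else best_focus

-- ===== PORT B =====
-- _MAX_KW_LEN = max(len(kw) for kws in FOCUS_KEYWORDS.values() for kw in kws)
-- (max over the fixed non-empty keyword list; foldl max 0 is exact since all lengths are positive)
def pvMaxKwLen : Nat :=
  ((focus_keywords.flatMap (fun p => p.2)).map (fun kw => kw.toList.length)).foldl max 0

def pick_visual_focus_py_alt (text : String) : String :=
  let lowerL : List Char := ' ' :: PySem.Chars.lower text.toList ++ [' ']
  -- grams = set(); for i in range(len(lower)): for l in range(1, _MAX_KW_LEN+1): grams.add(lower[i:i+l])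
  let grams : PySem.Set (List Char) :=
    (PySem.List.pyRange 0 (lowerL.length : Int) 1).foldl (fun g i =>
      (PySem.List.pyRange 1 ((pvMaxKwLen : Int) + 1) 1).foldl (fun g l =>
        PySem.Set.add g (PySem.List.slice lowerL (some i) (some (i + l)))) g)
      PySem.Set.empty
  -- best_focus, best_score = "mixed", 0; running best (sum of bools = countP; 'kw in grams' = Set.contains)
  (focus_keywords.foldl (fun (best : String × Int) p =>
      let score : Int := (p.2.countP (fun kw => PySem.Set.contains grams kw.toList) : Nat)
      if best.2 < score then (p.1, score) else best)
    ("mixed", 0)).1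

-- ===== PRECONDITION & SPEC =====
def Spec_pick_visual_focus_py (text : String) (out : String) : Prop := out = pick_visual_focus_py_alt text
instance (text : String) (out : String) : Decidable (Spec_pick_visual_focus_py text out) := by unfold Spec_pick_visual_focus_py; infer_instance

-- ===== CLAIM (what is proved, stated in full; the proofs are below) =====
def Claim_equal_pick_visual_focus_py : Prop := ∀ (text : String), Dom_pick_visual_focus_py text → Spec_pick_visual_focus_py text (pick_visual_focus_py text)

-- ===== LEMMAS AND PROOFS =====

-- membership in the nested add-fold building the gram index
theorem mem_nested_foldl_add {α β γ : Type} [BEq γ] [LawfulBEq γ] (outer : List α) (inner : List β)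
    (f : α → β → γ) (g0 : PySem.Set γ) (y : γ) :
    y ∈ outer.foldl (fun g i => inner.foldl (fun g l => PySem.Set.add g (f i l)) g) g0 ↔
      y ∈ g0 ∨ ∃ i ∈ outer, ∃ l ∈ inner, y = f i l := by
  induction outer generalizing g0 with
  | nil => simp
  | cons a as ih =>
    simp only [List.foldl_cons, ih, PySem.Set.mem_foldl_add, List.mem_cons]
    aesop

-- a gram of the text is exactly an infix of bounded positive length
theorem mem_grams_iff_isIn (lowerL kw : List Char) (h1 : 1 ≤ kw.length) (h8 : kw.length ≤ 8) :
    PySem.Set.contains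
      ((PySem.List.pyRange 0 (lowerL.length : Int) 1).foldl (fun g i =>
        (PySem.List.pyRange 1 ((8 : Int) + 1) 1).foldl (fun g l =>
          PySem.Set.add g (PySem.List.slice lowerL (some i) (some (i + l)))) g)
        PySem.Set.empty) kw
      = PySem.Chars.isIn kw lowerL := by
  rw [Bool.eq_iff_iff, PySem.Set.contains_iff, PySem.Chars.isIn_iff_infix,
      mem_nested_foldl_add]
  constructor
  · rintro (h | ⟨i, hi, l, hl, rfl⟩)
    · exact absurd h (by simp [PySem.Set.empty])
    · rw [PySem.List.mem_pyRange_one] at hi hl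
      have hieq : i = (i.toNat : Int) := (Int.toNat_of_nonneg hi.1).symm
      have hleq : l = (l.toNat : Int) := (Int.toNat_of_nonneg (by omega)).symm
      rw [hieq, hleq, PySem.List.slice_natCast_add]
      exact ((List.take_prefix _ _).isInfix).trans ((List.drop_suffix _ _).isInfix)
  · rintro ⟨s, t, hst⟩
    refine Or.inr ⟨(s.length : Int), ?_, (kw.length : Int), ?_, ?_⟩
    · rw [PySem.List.mem_pyRange_one]
      refine ⟨by positivity, ?_⟩
      rw [← hst]; simp only [List.length_append]
      push_cast; omega
    · rw [PySem.List.mem_pyRange_one]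
      constructor <;> [exact_mod_cast h1; exact_mod_cast (by omega : kw.length < 9)]
    · rw [PySem.List.slice_natCast_add, ← hst, List.append_assoc, List.drop_left,
          List.take_left]

-- ===== VERDICT (by name: the statement is the Claim_ definition above) =====
set_option maxRecDepth 8192 in
set_option maxHeartbeats 1000000 in
theorem pick_visual_focus_py_spec : Claim_equal_pick_visual_focus_py := by
  intro text _
  unfold Spec_pick_visual_focus_py pick_visual_focus_py pick_visual_focus_py_alt
  have h8 : pvMaxKwLen = 8 := by decide
  simp only [h8, Nat.cast_ofNat]
  -- keyword-length bounds, checked once over the fixed table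
  have hbounds : ∀ p ∈ focus_keywords, ∀ kw ∈ p.2,
      1 ≤ kw.toList.length ∧ kw.toList.length ≤ 8 := by decide
  -- B: each set lookup in the gram index equals the substring test
  rw [PySem.List.foldl_congr_mem focus_keywords _
      (fun (best : String × Int) p =>
        let score : Int := (p.2.countP (fun kw =>
          PySem.Chars.isIn kw.toList (' ' :: PySem.Chars.lower text.toList ++ [' '])) : Nat)
        if best.2 < score then (p.1, score) else best)
      ("mixed", 0)
      (by
        intro best p hp
        have : p.2.countP (fun kw => PySem.Set.contains
            ((PySem.List.pyRange 0 ((' ' :: PySem.Chars.lower text.toList ++ [' ']).length : Int) 1).foldl (fun g i =>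
              (PySem.List.pyRange 1 ((8 : Int) + 1) 1).foldl (fun g l =>
                PySem.Set.add g (PySem.List.slice (' ' :: PySem.Chars.lower text.toList ++ [' ']) (some i) (some (i + l)))) g)
              PySem.Set.empty) kw.toList)
            = p.2.countP (fun kw =>
              PySem.Chars.isIn kw.toList (' ' :: PySem.Chars.lower text.toList ++ [' '])) := by
          refine List.countP_congr (fun kw hkw => ?_)
          rw [mem_grams_iff_isIn _ _ (hbounds p hp kw hkw).1 (hbounds p hp kw hkw).2]
        simp only [this])]
  simp only [focus_keywords, List.foldl, PySem.List.sum_map_ite_one_zero]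
  generalize List.countP (fun x => PySem.Chars.isIn x.toList (' ' :: PySem.Chars.lower text.toList ++ [' '])) ["i ", "you ", "we ", "he ", "she ", "they ", "face", "eyes", "hand", "smile", "kiss", "walk", "run", "dance", "embrace"] = c1
  generalize List.countP (fun x => PySem.Chars.isIn x.toList (' ' :: PySem.Chars.lower text.toList ++ [' '])) ["sky", "sea", "river", "rain", "wind", "street", "station", "city", "room", "window", "night", "sunset", "mountain", "road"] = c2
  generalize List.countP (fun x => PySem.Chars.isIn x.toList (' ' :: PySem.Chars.lower text.toList ++ [' '])) ["letter", "chair", "bench", "lamp", "phone", "cup", "coffee", "train", "bicycle", "guitar", "door", "mirror", "flower"] = c3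
  generalize List.countP (fun x => PySem.Chars.isIn x.toList (' ' :: PySem.Chars.lower text.toList ++ [' '])) ["memory", "dream", "shadow", "echo", "silence", "absence", "goodbye", "waiting", "time", "summer", "winter", "lonely"] = c4
  simp [PySem.Dict.insert, PySem.Dict.contains, PySem.Dict.empty, PySem.Dict.keys,
    PySem.Dict.get?, PySem.Dict.getD, PySem.List.max?, List.foldl, List.find?]
  split_ifs <;> simp_all <;> try omega
  all_goals (split_ifs <;> simp_all <;> try omega)
  all_goals (split_ifs <;> simp_all <;> omega)
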